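-- pv_equiv track=rewrite | github.com/pantsbuild/pants | src/python/pants/backend/terraform/tailor.py | find_disjoint_longest_common_prefixes
-- ===== SOURCE A (Python) =====
-- from typing import Iterable
--
-- def longest_common_prefix(x: tuple[str, ...], y: tuple[str, ...]) -> tuple[str, ...]:
--     """Find the longest common prefix between two sequences."""
--
--     i = j = 0
--     while i < len(x) and j < len(y):
--         if x[i] != y[j]:
--             break
--         i = i + 1
--         j = j + 1
--
--     return x[:i]
--
-- def find_disjoint_longest_common_prefixes(
--     raw_values: Iterable[tuple[str, ...]]
-- ) -> set[tuple[str, ...]]: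
--     values = sorted(raw_values)
--
--     if len(values) == 0:
--         return set()
--     elif len(values) == 1:
--         return set(values)
--
--     prefixes = set()
--     current_prefix = values[0]
--
--     i = 1
--     while i < len(values):
--         potential_prefix = longest_common_prefix(current_prefix, values[i])
--         if potential_prefix:
--             # If this item still has any common prefix with the current run of items, then
--             # update the prefix to this potential prefix.
--             current_prefix = potential_prefix
--         else:
--             # If there is no common prefix between this item and the current run of items, then
--             # this run of items with a common prefix has ended. Record the current prefix and make
--             # the current item be the next current prefix.
--             prefixes.add(current_prefix)
--             current_prefix = values[i]
--         i += 1
--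
--     # Record any prefix from the last run of items.
--     if current_prefix:
--         prefixes.add(current_prefix)
--
--     return prefixes
-- ===== SOURCE B (Python) =====
-- def longest_common_prefix(x, y):
--     """Find the longest common prefix between two sequences."""
--
--     i = j = 0
--     while i < len(x) and j < len(y):
--         if x[i] != y[j]:
--             break
--         i = i + 1
--         j = j + 1
--
--     return x[:i]
--
-- def find_disjoint_longest_common_prefixes(raw_values):
--     # Group the sorted tuples by their first component (equal first components are
--     # adjacent after sorting, so each dict entry accumulates one whole run) and
--     # fold longest_common_prefix over each group.
--     groups = {}
--     for v in sorted(raw_values):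
--         k = v[:1]
--         groups[k] = longest_common_prefix(groups[k], v) if k in groups else v
--     return set(groups.values())
-- ===== Notes on version B (the rewrite author's own statement) =====
-- stated objective: simpler
-- what changed: A walks the sorted list with a running-prefix state machine that breaks a run when the running lcp becomes empty (plus special cases for 0 and 1 elements); B instead groups the sorted tuples in a dict keyed by each tuple's first component, folding longest_common_prefix per key, and returns the set of the dict's values with no special cases.
import Mathlib
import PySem

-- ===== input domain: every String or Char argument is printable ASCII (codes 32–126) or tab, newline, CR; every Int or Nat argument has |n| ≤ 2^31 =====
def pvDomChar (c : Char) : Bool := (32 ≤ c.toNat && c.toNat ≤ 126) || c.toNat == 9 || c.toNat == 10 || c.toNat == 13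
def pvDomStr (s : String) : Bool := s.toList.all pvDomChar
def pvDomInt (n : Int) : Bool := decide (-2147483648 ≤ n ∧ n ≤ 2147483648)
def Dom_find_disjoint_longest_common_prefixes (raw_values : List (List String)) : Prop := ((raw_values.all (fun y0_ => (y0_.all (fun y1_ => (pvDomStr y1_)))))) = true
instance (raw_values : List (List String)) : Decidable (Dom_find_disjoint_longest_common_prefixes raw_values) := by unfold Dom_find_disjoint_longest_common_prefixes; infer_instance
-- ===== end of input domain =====

-- B replaces A's run-break state machine (break a run when the running lcp dies, plus
-- special cases for 0/1 elements) by a dictionary keyed on each tuple's first component,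
-- folding longest_common_prefix per key group; same return value, simpler decomposition.

-- ===== PORT A =====
-- while i < len(x) and j < len(y): if x[i] != y[j]: break; i += 1; j += 1
def lcpLoop (x y : List String) (i j : Nat) : Nat :=
  if _h : i < x.length ∧ j < y.length then
    if x.getD i "" ≠ y.getD j "" then i
    else lcpLoop x y (i + 1) (j + 1)
  else i
termination_by x.length - i

def longest_common_prefix (x y : List String) : List String :=
  PySem.List.slice x none (some ((lcpLoop x y 0 0 : Nat) : Int))

-- the `while i < len(values)` loop of A, carried over the remaining list
def aLoop (prefixes : PySem.Set (List String)) (current : List String)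
    (rest : List (List String)) : PySem.Set (List String) :=
  match rest with
  | [] => if current.isEmpty then prefixes else PySem.Set.add prefixes current
  | v :: vs =>
    let potential := longest_common_prefix current v
    if potential.isEmpty then aLoop (PySem.Set.add prefixes current) v vs
    else aLoop prefixes potential vs

def find_disjoint_longest_common_prefixes (raw_values : List (List String)) : List (List String) :=
  let values := PySem.List.sorted raw_values (fun v => v) false
  match values with
  | [] => PySem.Set.empty
  | [v] => PySem.Set.ofList [v]
  | v0 :: v1 :: rest => aLoop PySem.Set.empty v0 (v1 :: rest)

-- ===== PORT B =====
-- groups[k] = longest_common_prefix(groups[k], v) if k in groups else v   (k = v[:1])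
def bStep (groups : PySem.Dict (List String) (List String)) (v : List String) :
    PySem.Dict (List String) (List String) :=
  let k := PySem.List.slice v none (some 1)
  PySem.Dict.insert groups k
    (if PySem.Dict.contains groups k then
      longest_common_prefix (PySem.Dict.getD groups k []) v
     else v)

def find_disjoint_longest_common_prefixes_alt (raw_values : List (List String)) : List (List String) :=
  PySem.Set.ofList
    (PySem.Dict.values
      ((PySem.List.sorted raw_values (fun v => v) false).foldl bStep PySem.Dict.empty))

-- ===== PRECONDITION & SPEC =====
def Spec_find_disjoint_longest_common_prefixes (raw_values : List (List String)) (out : List (List String)) : Prop := out = find_disjoint_longest_common_prefixes_alt raw_values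
instance (raw_values : List (List String)) (out : List (List String)) : Decidable (Spec_find_disjoint_longest_common_prefixes raw_values out) := by unfold Spec_find_disjoint_longest_common_prefixes; infer_instance

-- ===== CLAIM (what is proved, stated in full; the proofs are below) =====
def Claim_equal_find_disjoint_longest_common_prefixes : Prop := ∀ (raw_values : List (List String)), Dom_find_disjoint_longest_common_prefixes raw_values → Spec_find_disjoint_longest_common_prefixes raw_values (find_disjoint_longest_common_prefixes raw_values)

-- ===== LEMMAS AND PROOFS =====

-- v[:1], the grouping key
def keyOf (v : List String) : List String := v.take 1

-- structural characterisation of longest_common_prefix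
def lcpL : List String → List String → List String
  | a :: as, b :: bs => if a = b then a :: lcpL as bs else []
  | _, _ => []

-- consecutive grouping of a list by keyOf (the runs both programs reduce)
def groupsOf : List (List String) → List (List (List String))
  | [] => []
  | x :: xs =>
    (x :: xs.takeWhile (fun y => keyOf y == keyOf x)) ::
      groupsOf (xs.dropWhile (fun y => keyOf y == keyOf x))
termination_by l => l.length
decreasing_by
  have := List.length_dropWhile_le (fun y => keyOf y == keyOf x) xs
  simp; omega

def reduceG : List (List String) → List String
  | [] => []
  | h :: t => t.foldl longest_common_prefix h

def gkey : List (List String) → List String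
  | [] => []
  | h :: _ => keyOf h

-- the body of port A after sorting (proof-side name for its match)
def aBody (values : List (List String)) : List (List String) :=
  match values with
  | [] => PySem.Set.empty
  | [v] => PySem.Set.ofList [v]
  | v0 :: v1 :: rest => aLoop PySem.Set.empty v0 (v1 :: rest)

lemma A_def (raw_values : List (List String)) :
    find_disjoint_longest_common_prefixes raw_values
      = aBody (PySem.List.sorted raw_values (fun v => v) false) := rfl

lemma lcpL_nil_right (x : List String) : lcpL x [] = [] := by cases x <;> rfl

lemma lcpLoop_eq (x y : List String) (i : Nat) :
    lcpLoop x y i i = i + (lcpL (x.drop i) (y.drop i)).length := by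
  rw [lcpLoop]
  split
  · rename_i h
    obtain ⟨h1, h2⟩ := h
    have hdx : x.drop i = x[i] :: x.drop (i + 1) := (List.getElem_cons_drop h1).symm
    have hdy : y.drop i = y[i] :: y.drop (i + 1) := (List.getElem_cons_drop h2).symm
    rw [List.getD_eq_getElem x _ h1, List.getD_eq_getElem y _ h2, hdx, hdy]
    by_cases heq : x[i] = y[i]
    · rw [if_neg (show ¬(x[i] ≠ y[i]) from by simp [heq])]
      rw [lcpLoop_eq x y (i + 1)]
      simp [lcpL, heq]
      omega
    · simp [lcpL, heq]
  · rename_i h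
    rcases Nat.lt_or_ge i x.length with h1 | h1
    · have h2 : y.length ≤ i := by omega
      rw [List.drop_eq_nil_of_le h2, lcpL_nil_right]
      simp
    · rw [List.drop_eq_nil_of_le h1]
      simp [lcpL]
termination_by x.length - i

lemma lcpL_prefix (x y : List String) : lcpL x y <+: x := by
  induction x generalizing y with
  | nil => simp [lcpL]
  | cons a as ih =>
    cases y with
    | nil => simp [lcpL]
    | cons b bs =>
      by_cases hab : a = b
      · simpa [lcpL, hab] using (ih bs)
      · simp [lcpL, hab]

lemma lcp_eq : longest_common_prefix = lcpL := by
  funext x y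
  unfold longest_common_prefix
  rw [PySem.List.slice_to _ (by positivity)]
  have h := lcpLoop_eq x y 0
  simp at h
  rw [h]
  simp
  exact (List.prefix_iff_eq_take.mp (lcpL_prefix x y)).symm

lemma keyOf_eq_nil {v : List String} : keyOf v = [] ↔ v = [] := by
  cases v <;> simp [keyOf]

lemma foldl_lcpL_nil (l : List (List String)) : l.foldl lcpL [] = [] := by
  induction l with
  | nil => rfl
  | cons y ys ih => simpa [lcpL] using ih

lemma lcpL_same_key {c y : List String} (hc : c ≠ []) (h : keyOf y = keyOf c) :
    lcpL c y ≠ [] ∧ keyOf (lcpL c y) = keyOf c := by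
  match c, y with
  | a :: as, b :: bs =>
    simp [keyOf] at h
    subst h
    simp [lcpL, keyOf]
  | a :: as, [] => simp [keyOf] at h

lemma lcpL_diff_key {c y : List String} (hc : c ≠ []) (h : keyOf y ≠ keyOf c) :
    lcpL c y = [] := by
  match c, y with
  | a :: as, [] => rfl
  | a :: as, b :: bs =>
    have hba : b ≠ a := by intro he; exact h (by simp [keyOf, he])
    simp [lcpL, Ne.symm hba]

lemma slice_one (v : List String) : PySem.List.slice v none (some 1) = keyOf v := by
  have := PySem.List.slice_to v (b := 1) (by norm_num)
  simpa [keyOf] using this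

-- Mathlib's lex order on List String (the order the sort produces)
lemma le_nil_M {x : List String} (h : x ≤ []) : x = [] := by
  rcases lt_or_eq_of_le h with h | h
  · exact absurd h (List.not_lex_nil)
  · exact h

lemma keyOf_mono {x y : List String} (h : x ≤ y) : keyOf x ≤ keyOf y := by
  rcases lt_or_eq_of_le h with hlt | he
  · cases hlt with
    | nil => exact le_of_lt (List.Lex.nil)
    | @cons a as bs htail => simp [keyOf]
    | @rel a as b bs hab => exact le_of_lt (List.Lex.rel hab)
  · exact he ▸ le_refl _

lemma sorted_M (xs : List (List String)) :
    (PySem.List.sorted xs (fun v => v) false).Pairwise (fun a b => a ≤ b) := by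
  have h2 := PySem.List.sorted_pairwise (κ := List String) xs (fun v => v)
  have he : PySem.List.sorted xs (fun v => v) false
      = @PySem.List.sorted (List String) (List String) List.instLinearOrder.toLT
          LinearOrder.toDecidableLT xs (fun v => v) false := by
    rw [PySem.List.sorted_eq_foldl_insertBy,
      @PySem.List.sorted_eq_foldl_insertBy (List String) (List String)
        List.instLinearOrder.toLT LinearOrder.toDecidableLT xs (fun v => v)]
    congr 1
    funext acc x
    congr 1
    funext a b
    exact decide_eq_decide.mpr (List.lt_iff_lex_lt a b)
  rw [he]; exact h2

lemma set_add_add (s : PySem.Set (List String)) (a : List String) :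
    PySem.Set.add (PySem.Set.add s a) a = PySem.Set.add s a := by
  by_cases h : a ∈ s
  · simp [PySem.Set.add, PySem.Set.contains, h]
  · simp [PySem.Set.add, PySem.Set.contains, h]

lemma A1 (l : List (List String)) : ∀ (c : List String) (s : PySem.Set (List String)),
    c ≠ [] → (∀ x ∈ l, x ≠ []) →
    aLoop s c l = List.foldl PySem.Set.add s
      (((l.takeWhile fun y => keyOf y == keyOf c).foldl longest_common_prefix c) ::
        (groupsOf (l.dropWhile fun y => keyOf y == keyOf c)).map reduceG) := by
  induction l with
  | nil =>
    intro c s hc _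
    simp [aLoop, List.isEmpty_iff, hc, groupsOf]
  | cons y ys ih =>
    intro c s hc hall
    by_cases hk : keyOf y = keyOf c
    · have hlcp := lcpL_same_key hc hk
      rw [← lcp_eq] at hlcp
      obtain ⟨hne, hkey⟩ := hlcp
      have hstep : aLoop s c (y :: ys) = aLoop s (longest_common_prefix c y) ys := by
        simp [aLoop, List.isEmpty_iff, hne]
      rw [hstep, ih _ s hne (fun x hx => hall x (by simp [hx]))]
      have hpred : (fun z => keyOf z == keyOf (longest_common_prefix c y))
          = (fun z => keyOf z == keyOf c) := funext fun z => by rw [hkey]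
      rw [hpred]
      have htw : (y :: ys).takeWhile (fun z => keyOf z == keyOf c)
          = y :: ys.takeWhile (fun z => keyOf z == keyOf c) := by
        simp [hk]
      have hdw : (y :: ys).dropWhile (fun z => keyOf z == keyOf c)
          = ys.dropWhile (fun z => keyOf z == keyOf c) := by
        simp [hk]
      rw [htw, hdw]
      simp
    · have hempty : longest_common_prefix c y = [] := by
        rw [lcp_eq]; exact lcpL_diff_key hc hk
      have hy : y ≠ [] := hall y (by simp)
      have hstep : aLoop s c (y :: ys) = aLoop (PySem.Set.add s c) y ys := by
        simp [aLoop, hempty]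
      rw [hstep, ih y (PySem.Set.add s c) hy (fun x hx => hall x (by simp [hx]))]
      have htw : (y :: ys).takeWhile (fun z => keyOf z == keyOf c) = [] := by
        simp [hk]
      have hdw : (y :: ys).dropWhile (fun z => keyOf z == keyOf c) = y :: ys := by
        simp [hk]
      rw [htw, hdw, groupsOf]
      simp only [List.map_cons, List.foldl_cons, List.foldl_nil, reduceG]

lemma lcp_nil_left (y : List String) : longest_common_prefix [] y = [] := by
  rw [lcp_eq]; rfl

lemma foldl_lcp_nil (l : List (List String)) : l.foldl longest_common_prefix [] = [] := by
  rw [lcp_eq]; exact foldl_lcpL_nil l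

lemma L2 (e : List (List String)) (he : ∀ y ∈ e, y = ([] : List String)) :
    ∀ (s : PySem.Set (List String)) (w0 : List String) (wt : List (List String)), w0 ≠ [] →
    aLoop s [] (e ++ w0 :: wt) = aLoop (PySem.Set.add s []) w0 wt := by
  induction e with
  | nil =>
    intro s w0 wt _
    simp [aLoop, lcp_nil_left]
  | cons y e' ih =>
    intro s w0 wt hw0
    have hy : y = [] := he y (by simp)
    subst hy
    have hstep : aLoop s [] (([] : List String) :: (e' ++ w0 :: wt))
        = aLoop (PySem.Set.add s []) [] (e' ++ w0 :: wt) := by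
      simp [aLoop, lcp_nil_left]
    rw [List.cons_append, hstep, ih (fun y hy => he y (by simp [hy])) _ _ _ hw0, set_add_add]

lemma L2' (e : List (List String)) (hne : e ≠ []) (he : ∀ y ∈ e, y = ([] : List String)) :
    ∀ (s : PySem.Set (List String)), aLoop s [] e = PySem.Set.add s [] := by
  induction e with
  | nil => exact absurd rfl hne
  | cons y e' ih =>
    intro s
    have hy : y = [] := he y (by simp)
    subst hy
    have hstep : aLoop s [] (([] : List String) :: e')
        = aLoop (PySem.Set.add s []) [] e' := by
      simp [aLoop, lcp_nil_left]
    rw [hstep]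
    cases e' with
    | nil => simp [aLoop]
    | cons z e'' =>
      rw [ih (by simp) (fun y hy => he y (by simp [hy])) _, set_add_add]

lemma Aeq (values : List (List String)) (hp : values.Pairwise (fun a b => a ≤ b)) :
    aBody values = PySem.Set.ofList ((groupsOf values).map reduceG) := by
  match values with
  | [] => simp [aBody, groupsOf]
  | [v] =>
    show PySem.Set.ofList [v] = _
    simp [groupsOf, reduceG]
  | v0 :: v1 :: rest =>
    set vs := v1 :: rest with hvs
    show aLoop PySem.Set.empty v0 vs = _
    have hpvs : vs.Pairwise (fun a b => a ≤ b) := hp.of_cons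
    have hhead : ∀ x ∈ vs, v0 ≤ x := fun x hx => List.rel_of_pairwise_cons hp hx
    by_cases hv0 : v0 = ([] : List String)
    · subst hv0
      set pred := (fun y => keyOf y == keyOf ([] : List String)) with hpred
      set e := vs.takeWhile pred with hee
      set w := vs.dropWhile pred with hww
      have hvsw : e ++ w = vs := List.takeWhile_append_dropWhile
      have hemem : ∀ y ∈ e, y = ([] : List String) := by
        intro y hy
        have := List.mem_takeWhile_imp hy
        simpa [hpred, keyOf_eq_nil, keyOf] using this
      have hgroups : groupsOf (([] : List String) :: vs) = (([] : List String) :: e) :: groupsOf w := by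
        rw [groupsOf]
      cases hw : w with
      | nil =>
        have hevs : e = vs := by rw [← hvsw, hw, List.append_nil]
        have h1 : aLoop PySem.Set.empty [] vs = PySem.Set.add PySem.Set.empty [] :=
          L2' vs (by simp [hvs]) (hevs ▸ hemem) _
        rw [h1, hgroups, hw]
        simp [groupsOf, reduceG, foldl_lcp_nil]
        rfl
      | cons w0 wt =>
        have hw0 : w0 ≠ [] := by
          have h1 : vs.find? (fun x => !(pred x)) = some w0 := by
            rw [List.find?_not_eq_head?_dropWhile, ← hww, hw]; rfl
          have h2 := List.find?_some h1
          simp [hpred, keyOf] at h2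
          intro hcon
          rw [hcon] at h2
          exact h2 rfl
        have hwall : ∀ x ∈ w0 :: wt, x ≠ ([] : List String) := by
          have hpw : (w0 :: wt).Pairwise (fun a b => a ≤ b) := by
            rw [← hw, hww]; exact hpvs.sublist (List.dropWhile_sublist _)
          intro x hx
          rcases List.mem_cons.mp hx with h | h
          · exact h ▸ hw0
          · intro hcon
            exact hw0 (le_nil_M (hcon ▸ List.rel_of_pairwise_cons hpw h))
        have hsplit : vs = e ++ w0 :: wt := by rw [← hvsw, hw]
        rw [hgroups, hw, groupsOf]
        rw [hsplit, L2 e hemem _ _ _ hw0,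
          A1 wt w0 (PySem.Set.add PySem.Set.empty []) hw0
            (fun x hx => hwall x (by simp [hx]))]
        simp only [List.map_cons, PySem.Set.ofList_eq_foldl, List.foldl_cons]
        have hred : reduceG (([] : List String) :: e) = [] := by
          simp [reduceG, foldl_lcp_nil]
        rw [hred]
        rfl
    · have hall : ∀ x ∈ v0 :: vs, x ≠ ([] : List String) := by
        intro x hx
        rcases List.mem_cons.mp hx with h | h
        · exact h ▸ hv0
        · intro hcon
          exact hv0 (le_nil_M (hcon ▸ hhead x h))
      rw [A1 vs v0 PySem.Set.empty hv0 (fun x hx => hall x (by simp [hx]))]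
      rw [groupsOf]
      simp only [List.map_cons, PySem.Set.ofList_eq_foldl, List.foldl_cons]
      rfl

lemma dropWhile_head_false (p : List String → Bool) (l : List (List String))
    {w0 : List String} {wt : List (List String)} (h : l.dropWhile p = w0 :: wt) :
    p w0 = false := by
  have h1 : l.find? (fun x => !(p x)) = some w0 := by
    rw [List.find?_not_eq_head?_dropWhile, h]; rfl
  have h2 := List.find?_some h1
  simpa using h2

lemma B4run (tw : List (List String)) (k : List String)
    (htw : ∀ y ∈ tw, keyOf y = k) :
    ∀ (d : PySem.Dict (List String) (List String)) (c : List String),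
    d.keys.Nodup → d.get? k = some c →
    (tw.foldl bStep d).items
      = d.items.map (fun p => if p.1 == k then (k, tw.foldl longest_common_prefix c) else p) := by
  induction tw with
  | nil =>
    intro d c hnd hget
    simp only [List.foldl_nil]
    conv_lhs => rw [← List.map_id d.items]
    apply List.map_congr_left
    intro p hp
    by_cases hpk : p.1 = k
    · have hmem : (k, p.2) ∈ d.items := by rwa [← hpk]
      have h2 := PySem.Dict.get?_of_mem_items d hmem hnd
      rw [hget] at h2
      have hc : c = p.2 := by injection h2
      rw [if_pos (by simp [hpk]), hc, ← hpk]
      rfl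
    · simp [hpk]
  | cons y t ih =>
    intro d c hnd hget
    have hky : keyOf y = k := htw y (by simp)
    have hcont : d.contains k = true := by
      rcases h : d.contains k with _ | _
      · rw [(PySem.Dict.get?_eq_none_iff_contains d k).mpr h] at hget; cases hget
      · rfl
    have hstep : bStep d y = d.insert k (longest_common_prefix c y) := by
      simp [bStep, slice_one, hky, hcont, PySem.Dict.getD_of_get?_eq_some d [] hget]
    rw [List.foldl_cons, hstep]
    have hnd2 : (d.insert k (longest_common_prefix c y)).keys.Nodup := by
      rw [PySem.Dict.keys_insert_of_contains d _ hcont]; exact hnd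
    rw [ih (fun y hy => htw y (by simp [hy]))
        (d.insert k (longest_common_prefix c y)) (longest_common_prefix c y) hnd2
        (PySem.Dict.get?_insert_self d k _),
      PySem.Dict.items_insert_of_contains d _ hcont, List.map_map]
    apply List.map_congr_left
    intro p _
    by_cases hpk : p.1 == k
    · simp [Function.comp, hpk]
    · simp [Function.comp, hpk]

lemma B4 (l : List (List String)) : ∀ (d : PySem.Dict (List String) (List String)),
    l.Pairwise (fun a b => a ≤ b) → d.keys.Nodup →
    (∀ x ∈ l, d.contains (keyOf x) = false) →
    (l.foldl bStep d).items = d.items ++ (groupsOf l).map (fun g => (gkey g, reduceG g)) := by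
  match l with
  | [] => intro d _ _ _; simp [groupsOf]
  | x :: xs =>
    intro d hp hcnd hcont
    have hcx : d.contains (keyOf x) = false := hcont x (by simp)
    have hknotin : keyOf x ∉ d.keys := by
      intro hmem
      rw [(PySem.Dict.contains_iff_mem_keys d (keyOf x)).mpr hmem] at hcx
      cases hcx
    have hstep : bStep d x = d.insert (keyOf x) x := by
      simp [bStep, slice_one, hcx]
    have hxs : xs = xs.takeWhile (fun y => keyOf y == keyOf x)
        ++ xs.dropWhile (fun y => keyOf y == keyOf x) := List.takeWhile_append_dropWhile.symm
    have hfold : (x :: xs).foldl bStep d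
        = (xs.dropWhile (fun y => keyOf y == keyOf x)).foldl bStep
            ((xs.takeWhile (fun y => keyOf y == keyOf x)).foldl bStep (d.insert (keyOf x) x)) := by
      conv_lhs => rw [List.foldl_cons, hstep, hxs, List.foldl_append]
    have hd1items : (d.insert (keyOf x) x).items = d.items ++ [(keyOf x, x)] :=
      PySem.Dict.items_insert_of_not_contains d x hcx
    have hd1keys : (d.insert (keyOf x) x).keys = d.keys ++ [keyOf x] := by
      show ((d.insert (keyOf x) x).items.map Prod.fst) = _
      rw [hd1items, List.map_append]; rfl
    have hnd1 : (d.insert (keyOf x) x).keys.Nodup := by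
      rw [hd1keys]
      exact hcnd.append (List.nodup_singleton _)
        (fun a ha hb => hknotin ((List.mem_singleton.mp hb) ▸ ha))
    have hrun := B4run (xs.takeWhile (fun y => keyOf y == keyOf x)) (keyOf x)
      (fun y hy => by simpa using List.mem_takeWhile_imp hy)
      (d.insert (keyOf x) x) x hnd1 (PySem.Dict.get?_insert_self d (keyOf x) x)
    have hd2items : ((xs.takeWhile (fun y => keyOf y == keyOf x)).foldl bStep
          (d.insert (keyOf x) x)).items
        = d.items ++ [(keyOf x,
            (xs.takeWhile (fun y => keyOf y == keyOf x)).foldl longest_common_prefix x)] := by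
      rw [hrun, hd1items, List.map_append]
      congr 1
      · conv_rhs => rw [← List.map_id d.items]
        apply List.map_congr_left
        intro p hp2
        have hpk : p.1 ≠ keyOf x := by
          intro he
          exact hknotin (he ▸ List.mem_map_of_mem hp2 (f := Prod.fst))
        rw [if_neg (by simp [hpk])]; rfl
      · simp
    have hd2keys : ((xs.takeWhile (fun y => keyOf y == keyOf x)).foldl bStep
          (d.insert (keyOf x) x)).keys = d.keys ++ [keyOf x] := by
      show (_root_.List.map Prod.fst _) = _
      rw [hd2items, List.map_append]; rfl
    have hkdr : ∀ y ∈ xs.dropWhile (fun z => keyOf z == keyOf x), keyOf y ≠ keyOf x := by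
      cases hdd : xs.dropWhile (fun z => keyOf z == keyOf x) with
      | nil => simp
      | cons w0 wt =>
        have hw0k : keyOf w0 ≠ keyOf x := by
          have := dropWhile_head_false (fun z => keyOf z == keyOf x) xs hdd
          simpa using this
        have hw0mem : w0 ∈ xs := (List.dropWhile_sublist _).subset (by rw [hdd]; simp)
        have hpdr : (w0 :: wt).Pairwise (fun a b => a ≤ b) := by
          rw [← hdd]; exact hp.of_cons.sublist (List.dropWhile_sublist _)
        intro y hy
        rcases List.mem_cons.mp hy with h | h
        · exact h ▸ hw0k
        · intro hcon
          have h1 : keyOf x ≤ keyOf w0 :=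
            keyOf_mono (List.rel_of_pairwise_cons hp hw0mem)
          have h2 : keyOf w0 ≤ keyOf y := keyOf_mono (List.rel_of_pairwise_cons hpdr h)
          exact hw0k (le_antisymm (hcon ▸ h2) h1)
    have hihcont : ∀ y ∈ xs.dropWhile (fun z => keyOf z == keyOf x),
        ((xs.takeWhile (fun z => keyOf z == keyOf x)).foldl bStep
          (d.insert (keyOf x) x)).contains (keyOf y) = false := by
      intro y hy
      have hyl : y ∈ xs := (List.dropWhile_sublist _).subset hy
      have h1 : keyOf y ∉ d.keys := by
        intro hmem
        have := hcont y (by simp [hyl])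
        rw [(PySem.Dict.contains_iff_mem_keys d (keyOf y)).mpr hmem] at this
        cases this
      rcases h : ((xs.takeWhile (fun z => keyOf z == keyOf x)).foldl bStep
          (d.insert (keyOf x) x)).contains (keyOf y) with _ | _
      · rfl
      · exfalso
        have := (PySem.Dict.contains_iff_mem_keys _ (keyOf y)).mp h
        rw [hd2keys] at this
        rcases List.mem_append.mp this with h2 | h2
        · exact h1 h2
        · exact hkdr y hy (by simpa using h2)
    have hnd2 : ((xs.takeWhile (fun z => keyOf z == keyOf x)).foldl bStep
        (d.insert (keyOf x) x)).keys.Nodup := by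
      rw [hd2keys]
      exact hcnd.append (List.nodup_singleton _)
        (fun a ha hb => hknotin ((List.mem_singleton.mp hb) ▸ ha))
    have hih := B4 (xs.dropWhile (fun z => keyOf z == keyOf x))
      ((xs.takeWhile (fun z => keyOf z == keyOf x)).foldl bStep (d.insert (keyOf x) x))
      (hp.of_cons.sublist (List.dropWhile_sublist _)) hnd2 hihcont
    rw [hfold, hih, hd2items, groupsOf]
    simp [reduceG, gkey]
termination_by l.length
decreasing_by
  have := List.length_dropWhile_le (fun z => keyOf z == keyOf x) xs
  simp; omega

-- ===== VERDICT (by name: the statement is the Claim_ definition above) =====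
theorem find_disjoint_longest_common_prefixes_spec : Claim_equal_find_disjoint_longest_common_prefixes := by
  intro raw_values _
  unfold Spec_find_disjoint_longest_common_prefixes
  rw [A_def]
  unfold find_disjoint_longest_common_prefixes_alt
  set values := PySem.List.sorted raw_values (fun v => v) false with hv
  have hp := sorted_M raw_values
  rw [← hv] at hp
  rw [Aeq values hp]
  have hb := B4 values PySem.Dict.empty hp
    (by rw [PySem.Dict.keys_empty]; exact List.nodup_nil)
    (fun x _ => PySem.Dict.contains_empty _)
  have hvals : (values.foldl bStep PySem.Dict.empty).values
      = (groupsOf values).map reduceG := by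
    show ((values.foldl bStep PySem.Dict.empty).items.map Prod.snd) = _
    rw [hb]
    simp [PySem.Dict.empty, List.map_map]
  rw [hvals]
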